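-- pv_equiv track=rewrite | github.com/surister/bot | bot/cogs/adventofcode.py | _completions_from_starboard
-- ===== SOURCE A (Python) =====
-- def _completions_from_starboard(starboard: list) -> tuple:
--     """
--     Return days completed, as a (1 star, 2 star) tuple, from starboard
--     """
--
--     completions = [0, 0]
--     for day in starboard:
--         if day[0]:
--             completions[0] += 1
--         if day[1]:
--             completions[1] += 1
--
--     return tuple(completions)
-- ===== SOURCE B (Python) =====
-- def _completions_from_starboard(starboard: list) -> tuple:
--     """Two independent counting passes, one per star position."""
--     return (sum(1 for day in starboard if day[0]),
--             sum(1 for day in starboard if day[1]))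
-- ===== Notes on version B (the rewrite author's own statement) =====
-- stated objective: idiomatic
-- what changed: Replaced the single loop maintaining a mutable two-element counter list with two independent generator-expression counting passes, one per star position.
import Mathlib
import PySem

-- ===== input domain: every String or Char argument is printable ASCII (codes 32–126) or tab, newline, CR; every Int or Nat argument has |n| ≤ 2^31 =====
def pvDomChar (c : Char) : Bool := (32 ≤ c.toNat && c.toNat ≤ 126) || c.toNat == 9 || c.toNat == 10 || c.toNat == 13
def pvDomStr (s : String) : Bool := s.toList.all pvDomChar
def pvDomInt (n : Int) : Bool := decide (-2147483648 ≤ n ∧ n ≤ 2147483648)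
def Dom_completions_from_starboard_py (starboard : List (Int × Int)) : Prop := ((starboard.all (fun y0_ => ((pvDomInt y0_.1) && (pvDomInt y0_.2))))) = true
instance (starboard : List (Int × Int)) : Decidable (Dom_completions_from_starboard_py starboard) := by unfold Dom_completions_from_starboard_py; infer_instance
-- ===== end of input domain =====

-- B replaces A's single accumulator loop with two independent counting passes (idiomatic; same cost).

-- ===== PORT A =====
-- A: one loop over starboard updating a two-element counter [c0, c1].
def completions_from_starboard_py (starboard : List (Int × Int)) : Int × Int :=
  starboard.foldl
    (fun completions day =>
      let completions := if day.1 ≠ 0 then (completions.1 + 1, completions.2) else completions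
      if day.2 ≠ 0 then (completions.1, completions.2 + 1) else completions)
    (0, 0)

-- ===== PORT B =====
-- B: two independent passes, counting each star position separately.
def completions_from_starboard_py_alt (starboard : List (Int × Int)) : Int × Int :=
  ((starboard.countP (fun day => day.1 ≠ 0) : Int),
   (starboard.countP (fun day => day.2 ≠ 0) : Int))

-- ===== PRECONDITION & SPEC =====
def Spec_completions_from_starboard_py (starboard : List (Int × Int)) (out : Int × Int) : Prop := out = completions_from_starboard_py_alt starboard
instance (starboard : List (Int × Int)) (out : Int × Int) : Decidable (Spec_completions_from_starboard_py starboard out) := by unfold Spec_completions_from_starboard_py; infer_instance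

-- ===== CLAIM (what is proved, stated in full; the proofs are below) =====
def Claim_equal_completions_from_starboard_py : Prop := ∀ (starboard : List (Int × Int)), Dom_completions_from_starboard_py starboard → Spec_completions_from_starboard_py starboard (completions_from_starboard_py starboard)

-- ===== LEMMAS AND PROOFS =====

-- A's fold started from an arbitrary accumulator equals that accumulator plus B's two counts.
lemma foldA_eq (starboard : List (Int × Int)) (c0 c1 : Int) :
    starboard.foldl
      (fun completions day =>
        let completions := if day.1 ≠ 0 then (completions.1 + 1, completions.2) else completions
        if day.2 ≠ 0 then (completions.1, completions.2 + 1) else completions)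
      (c0, c1)
    = (c0 + (starboard.countP (fun day => day.1 ≠ 0) : Int),
       c1 + (starboard.countP (fun day => day.2 ≠ 0) : Int)) := by
  induction starboard generalizing c0 c1 with
  | nil => simp
  | cons d t ih =>
    have hd :
        (let completions := if d.1 ≠ 0 then (((c0, c1) : Int × Int).1 + 1, ((c0, c1) : Int × Int).2) else ((c0, c1) : Int × Int)
         if d.2 ≠ 0 then (completions.1, completions.2 + 1) else completions)
        = (((c0 + if d.1 ≠ 0 then 1 else 0), (c1 + if d.2 ≠ 0 then 1 else 0)) : Int × Int) := by
      by_cases h1 : d.1 ≠ 0 <;> by_cases h2 : d.2 ≠ 0 <;> simp [h1, h2]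
    rw [List.foldl_cons, hd, ih, List.countP_cons, List.countP_cons, Prod.mk.injEq]
    by_cases h1 : d.1 ≠ 0 <;> by_cases h2 : d.2 ≠ 0 <;>
      simp [h1, h2] <;> omega

-- ===== VERDICT (by name: the statement is the Claim_ definition above) =====
theorem completions_from_starboard_py_spec : Claim_equal_completions_from_starboard_py := by
  intro starboard _
  unfold Spec_completions_from_starboard_py completions_from_starboard_py completions_from_starboard_py_alt
  rw [foldA_eq]
  simp
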